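-- pv_equiv track=rewrite | github.com/Marcin-Ramotowski/checkio-exercises | O'Reilly/median_of_three.py | median_three
-- ===== SOURCE A (Python) =====
-- from typing import Iterable
--
-- def median(numbers: list):
--     numbers.sort()
--     index = len(numbers) // 2
--     if len(numbers) % 2 == 1:
--         return numbers[index]
--     else:
--         return (numbers[index] + numbers[index-1]) / 2
--
-- def median_three(els: Iterable[int]) -> Iterable[int]:
--     numbers = []
--     for i in range(len(els)):
--         if i < 2:
--             numbers.append(els[i])
--         else:
--             number = median([els[i], els[i-1], els[i-2]])
--             numbers.append(number)
--     return numbers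
-- ===== SOURCE B (Python) =====
-- def median_three(els):
--     # Staged-pass formulation: median(a,b,c) == min(max(a,b), max(b,c), max(a,c)),
--     # so build the pairwise-max lists once and combine them, no sorting.
--     pairmax = [max(x, y) for x, y in zip(els, els[1:])]
--     skipmax = [max(x, z) for x, z in zip(els, els[2:])]
--     meds = [min(p, q, r) for p, q, r in zip(pairmax, pairmax[1:], skipmax)]
--     return list(els[:2]) + meds
-- ===== Notes on version B (the rewrite author's own statement) =====
-- stated objective: alternative
-- what changed: Replaces the per-window sort-based median helper inside an index loop by staged passes: two pairwise-max lists (adjacent and skip-one pairs) are built first and the medians are obtained by combining them with the identity median(a,b,c)=min(max(a,b),max(b,c),max(a,c)).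
import Mathlib
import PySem

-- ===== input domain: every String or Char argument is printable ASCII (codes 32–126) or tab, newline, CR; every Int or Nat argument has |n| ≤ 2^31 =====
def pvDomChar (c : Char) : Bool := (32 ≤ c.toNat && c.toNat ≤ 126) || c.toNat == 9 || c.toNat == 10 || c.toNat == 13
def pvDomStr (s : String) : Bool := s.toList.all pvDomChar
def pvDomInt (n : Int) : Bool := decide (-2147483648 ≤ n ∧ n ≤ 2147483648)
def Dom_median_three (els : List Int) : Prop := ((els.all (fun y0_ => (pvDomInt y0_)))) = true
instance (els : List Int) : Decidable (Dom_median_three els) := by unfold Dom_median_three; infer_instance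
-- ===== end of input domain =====

-- B replaces A's per-window sort-based median inside an index loop by staged passes over
-- pairwise-max lists, using median(a,b,c) = min(max(a,b), max(b,c), max(a,c)) (objective: alternative).

-- ===== PORT A =====
-- helper `median`: sorts, takes the middle. Python's even branch returns a FLOAT
-- ((a+b)/2); it is unreachable from median_three (every call passes a 3-element list),
-- so it is ported with floor division here, exact on every reachable call.
def medianA (numbers : List Int) : Int :=
  let ns := PySem.List.sorted numbers (fun x => x) false
  let index : Int := PySem.Int.floordiv (ns.length : Int) 2
  if PySem.Int.mod (ns.length : Int) 2 = 1 then
    PySem.List.pyGetD ns index 0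
  else
    PySem.Int.floordiv (PySem.List.pyGetD ns index 0 + PySem.List.pyGetD ns (index - 1) 0) 2

def median_three (els : List Int) : List Int :=
  (PySem.List.pyRange 0 (els.length : Int) 1).foldl
    (fun numbers i =>
      if i < 2 then numbers ++ [PySem.List.pyGetD els i 0]
      else numbers ++ [medianA [PySem.List.pyGetD els i 0,
                                PySem.List.pyGetD els (i - 1) 0,
                                PySem.List.pyGetD els (i - 2) 0]]) []

-- ===== PORT B =====
def median_three_alt (els : List Int) : List Int :=
  let pairmax := (els.zip els.tail).map (fun p => max p.1 p.2)
  let skipmax := (els.zip els.tail.tail).map (fun p => max p.1 p.2)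
  let meds := (pairmax.zip (pairmax.tail.zip skipmax)).map
    (fun p => min (min p.1 p.2.1) p.2.2)
  els.take 2 ++ meds

-- ===== PRECONDITION & SPEC =====
def Spec_median_three (els : List Int) (out : List Int) : Prop := out = median_three_alt els
instance (els : List Int) (out : List Int) : Decidable (Spec_median_three els out) := by unfold Spec_median_three; infer_instance

-- ===== CLAIM (what is proved, stated in full; the proofs are below) =====
def Claim_equal_median_three : Prop := ∀ (els : List Int), Dom_median_three els → Spec_median_three els (median_three els)

-- ===== LEMMAS AND PROOFS =====

-- sorted middle of a 3-element list: if [x,y,z] is an ordered rearrangement of the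
-- input then medianA returns y
theorem medianA_mid (a b c x y z : Int) (hp : List.Perm [x, y, z] [a, b, c])
    (h1 : x ≤ y) (h2 : y ≤ z) : medianA [a, b, c] = y := by
  have hs : PySem.List.sorted [a, b, c] (fun t => t) false = [x, y, z] :=
    PySem.List.sorted_id_eq_of_perm_of_pairwise [a, b, c] [x, y, z] hp
      (by simp [List.pairwise_cons]; omega)
  simp [medianA, hs, PySem.Int.floordiv, PySem.Int.mod, PySem.List.pyGetD]

-- median-of-three as min of the three pairwise maxima
theorem medianA_eq_minmax (a b c : Int) :
    medianA [a, b, c] = min (min (max c b) (max b a)) (max c a) := by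
  rcases le_total a b with hab | hab <;> rcases le_total b c with hbc | hbc <;>
    rcases le_total a c with hac | hac
  · rw [medianA_mid a b c a b c (List.Perm.refl _) hab hbc];
    simp only [min_def, max_def]; split_ifs <;> omega
  · rw [medianA_mid a b c a b c (List.Perm.refl _) hab hbc];
    simp only [min_def, max_def]; split_ifs <;> omega
  · rw [medianA_mid a b c a c b ((List.Perm.swap b c []).cons a) hac hbc];
    simp only [min_def, max_def]; split_ifs <;> omega
  · rw [medianA_mid a b c c a b
        ((List.Perm.swap a c [b]).trans ((List.Perm.swap b c []).cons a)) hac hab];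
    simp only [min_def, max_def]; split_ifs <;> omega
  · rw [medianA_mid a b c b a c (List.Perm.swap a b [c]) hab hac];
    simp only [min_def, max_def]; split_ifs <;> omega
  · rw [medianA_mid a b c b c a
        (((List.Perm.swap a c []).cons b).trans (List.Perm.swap a b [c])) hbc hac];
    simp only [min_def, max_def]; split_ifs <;> omega
  · rw [medianA_mid a b c a b c (List.Perm.refl _) (by omega) (by omega)];
    simp only [min_def, max_def]; split_ifs <;> omega
  · rw [medianA_mid a b c c b a
        ((List.Perm.swap b c [a]).trans
          (((List.Perm.swap a c []).cons b).trans (List.Perm.swap a b [c]))) hbc hab];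
    simp only [min_def, max_def]; split_ifs <;> omega

theorem median_three_eq_map (els : List Int) :
    median_three els = (PySem.List.pyRange 0 (els.length : Int) 1).map
      (fun i => if i < 2 then PySem.List.pyGetD els i 0
        else medianA [PySem.List.pyGetD els i 0,
                      PySem.List.pyGetD els (i - 1) 0,
                      PySem.List.pyGetD els (i - 2) 0]) := by
  unfold median_three
  rw [show (fun (numbers : List Int) (i : Int) =>
        if i < 2 then numbers ++ [PySem.List.pyGetD els i 0]
        else numbers ++ [medianA [PySem.List.pyGetD els i 0,
                                  PySem.List.pyGetD els (i - 1) 0,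
                                  PySem.List.pyGetD els (i - 2) 0]]) =
      (fun numbers i => numbers ++ [if i < 2 then PySem.List.pyGetD els i 0
        else medianA [PySem.List.pyGetD els i 0,
                      PySem.List.pyGetD els (i - 1) 0,
                      PySem.List.pyGetD els (i - 2) 0]]) from by
    funext numbers i; split <;> rfl]
  rw [PySem.List.foldl_append_singleton_eq_map]
  simp

theorem median_three_spec' (els : List Int) : median_three els = median_three_alt els := by
  rw [median_three_eq_map]
  unfold median_three_alt
  apply List.ext_getElem
  · simp [PySem.List.length_pyRange_one, List.length_zip, List.length_tail]
    omega
  · intro j hj hj2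
    have hn : j < els.length := by
      simpa [PySem.List.length_pyRange_one] using hj
    rw [List.getElem_map, PySem.List.getElem_pyRange_one]
    by_cases h2 : j < 2
    · -- first two elements copied verbatim
      have : ((0 : Int) + j) < 2 := by omega
      rw [if_pos this, List.getElem_append_left (by simp; omega)]
      rw [PySem.List.pyGetD_eq_getElem els 0 (by omega) (by omega)]
      simp [List.getElem_take]
    · -- window case: index arithmetic, then the pairwise-max characterisation
      have hj2' : (2 : ℕ) ≤ j := by omega
      rw [if_neg (by omega)]
      have e1 : (0 : Int) + j - 1 = ((j - 1 : ℕ) : Int) := by omega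
      have e2 : (0 : Int) + j - 2 = ((j - 2 : ℕ) : Int) := by omega
      rw [e1, e2]
      rw [PySem.List.pyGetD_eq_getElem els 0 (by omega) (by omega),
          PySem.List.pyGetD_eq_getElem els 0 (by omega) (by omega),
          PySem.List.pyGetD_eq_getElem els 0 (by omega) (by omega)]
      rw [medianA_eq_minmax]
      rw [List.getElem_append_right (by simp; omega)]
      simp only [List.getElem_map, List.getElem_tail, List.getElem_zip]
      have ht : (List.take 2 els).length = 2 := by
        simp [List.length_take]; omega
      simp only [ht, zero_add, Int.toNat_natCast]
      have ha : j - 2 + 1 = j - 1 := by omega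
      have hb : j - 1 + 1 = j := by omega
      simp only [ha, hb]

-- ===== VERDICT (by name: the statement is the Claim_ definition above) =====
theorem median_three_spec : Claim_equal_median_three := by
  intro els _
  unfold Spec_median_three
  exact median_three_spec' els
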